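-- pv_equiv track=rewrite | github.com/stevejtrettel/lifting-modp | py/lattices-old.py | gens_to_list
-- ===== SOURCE A (Python) =====
-- def gens_to_list(gens:dict)->list:
--     den = max(gens.values())
--     pts = [(0,0)]
--     for g in gens:
--         ge = gens[g]
--         gx, gy = g
--         pts_new = []
--         for pt in pts:
--             ptx,pty = pt
--             pts_new+=[((ptx+e*gx)%den,(pty+e*gy)%den)
--                       for e in range(ge)]
--         pts = pts_new
--     return pts
-- ===== SOURCE B (Python) =====
-- def gens_to_list(gens: dict) -> list:
--     den = max(gens.values())
--     items = list(gens.items())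
--
--     def rec(i):
--         if i == len(items):
--             return [(0, 0)]
--         (gx, gy), ge = items[i]
--         tail = rec(i + 1)
--         return [((x + e * gx) % den, (y + e * gy) % den)
--                 for e in range(ge) for (x, y) in tail]
--
--     return rec(0)
-- ===== Notes on version B (the rewrite author's own statement) =====
-- stated objective: alternative
-- what changed: Replaces A's k successive whole-list rebuilds (each pass maps the growing point list through one generator) by a single back-to-front recursion over the generators that builds the product of exponent ranges once, shifting the recursively built tail points by e*g mod den.
import Mathlib
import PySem

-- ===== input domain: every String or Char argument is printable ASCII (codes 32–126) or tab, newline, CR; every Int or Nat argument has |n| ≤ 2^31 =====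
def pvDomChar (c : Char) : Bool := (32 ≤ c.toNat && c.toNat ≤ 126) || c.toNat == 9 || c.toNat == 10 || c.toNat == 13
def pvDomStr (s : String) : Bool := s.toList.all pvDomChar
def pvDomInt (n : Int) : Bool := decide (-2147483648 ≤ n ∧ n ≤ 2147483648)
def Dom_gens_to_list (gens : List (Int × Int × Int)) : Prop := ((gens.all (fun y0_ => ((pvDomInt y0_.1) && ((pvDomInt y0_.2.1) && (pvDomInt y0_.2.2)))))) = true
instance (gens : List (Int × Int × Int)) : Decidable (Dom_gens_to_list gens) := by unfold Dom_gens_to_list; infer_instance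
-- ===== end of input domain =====

-- B replaces A's per-generator rebuilds of the whole point list by one back-to-front
-- recursion over the generators (alternative decomposition, same cost).


-- ===== PORT A =====
-- A: den = max(values); then for each generator, rebuild the whole point list
-- (for each old point append all its shifts (pt + e*g) % den, e in range(ge)).
def gens_to_list (gens : List (Int × Int × Int)) : List (Int × Int) :=
  let den : Int := (PySem.List.max? (gens.map (fun t => t.2.2)) (fun x => x)).getD 0
  gens.foldl
    (fun pts t =>
      pts.foldl
        (fun acc pt =>
          acc ++ (PySem.List.pyRange 0 t.2.2 1).map
            (fun e => (PySem.Int.mod (pt.1 + e * t.1) den,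
                       PySem.Int.mod (pt.2 + e * t.2.1) den)))
        [])
    [(0, 0)]

-- ===== PORT B =====
-- B's rec(i): points generated by items i..; head exponent outermost, the tail list built once.
def gensRecB (den : Int) : List (Int × Int × Int) → List (Int × Int)
  | [] => [(0, 0)]
  | t :: rest =>
    let tail := gensRecB den rest
    (PySem.List.pyRange 0 t.2.2 1).flatMap
      (fun e => tail.map
        (fun p => (PySem.Int.mod (p.1 + e * t.1) den,
                   PySem.Int.mod (p.2 + e * t.2.1) den)))

def gens_to_list_alt (gens : List (Int × Int × Int)) : List (Int × Int) :=
  let den : Int := (PySem.List.max? (gens.map (fun t => t.2.2)) (fun x => x)).getD 0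
  gensRecB den gens

-- ===== PRECONDITION & SPEC =====
-- Pre_ excludes only the empty dict, on which Python's max(gens.values()) raises ValueError.
def Pre_gens_to_list (gens : List (Int × Int × Int)) : Prop := gens ≠ []
instance (gens : List (Int × Int × Int)) : Decidable (Pre_gens_to_list gens) := by unfold Pre_gens_to_list; infer_instance
def pvWitness_gens_to_list : (List (Int × Int × Int)) := [(1, 0, 2)]

def Spec_gens_to_list (gens : List (Int × Int × Int)) (out : List (Int × Int)) : Prop := out = gens_to_list_alt gens
instance (gens : List (Int × Int × Int)) (out : List (Int × Int)) : Decidable (Spec_gens_to_list gens out) := by unfold Spec_gens_to_list; infer_instance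

-- ===== CLAIM (what is proved, stated in full; the proofs are below) =====
def Claim_equal_gens_to_list : Prop := ∀ (gens : List (Int × Int × Int)), Dom_gens_to_list gens → Pre_gens_to_list gens → Spec_gens_to_list gens (gens_to_list gens)

-- ===== LEMMAS AND PROOFS =====

-- Python '%' by a positive modulus: reduce either summand first, same result; idempotence.
theorem pvModAddLeft (a b d : Int) (hd : 0 < d) :
    PySem.Int.mod (PySem.Int.mod a d + b) d = PySem.Int.mod (a + b) d := by
  rw [PySem.Int.mod_eq_emod_of_pos hd, PySem.Int.mod_eq_emod_of_pos hd,
      PySem.Int.mod_eq_emod_of_pos (a := a + b) hd, Int.add_emod, Int.emod_emod_of_dvd _ dvd_rfl,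
      ← Int.add_emod]

theorem pvModAddRight (a b d : Int) (hd : 0 < d) :
    PySem.Int.mod (a + PySem.Int.mod b d) d = PySem.Int.mod (a + b) d := by
  rw [add_comm a, pvModAddLeft b a d hd, add_comm]

theorem pvModMod (a d : Int) (hd : 0 < d) :
    PySem.Int.mod (PySem.Int.mod a d) d = PySem.Int.mod a d := by
  simpa using pvModAddLeft a 0 d hd

-- The elements B's recursion produces are already reduced mod den.
theorem gensRecB_reduced (den : Int) (hd : 0 < den) (gs : List (Int × Int × Int)) :
    ∀ q ∈ gensRecB den gs, PySem.Int.mod q.1 den = q.1 ∧ PySem.Int.mod q.2 den = q.2 := by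
  cases gs with
  | nil =>
    intro q hq
    simp only [gensRecB, List.mem_singleton] at hq
    subst hq
    constructor <;> simp [PySem.Int.mod_eq_emod_of_pos hd]
  | cons t rest =>
    intro q hq
    simp only [gensRecB, List.mem_flatMap, List.mem_map] at hq
    obtain ⟨e, _, p, _, rfl⟩ := hq
    exact ⟨pvModMod _ den hd, pvModMod _ den hd⟩

-- One A-pass over the point list is a flatMap.
theorem stepA_eq_flatMap (den : Int) (t : Int × Int × Int) (pts : List (Int × Int)) :
    pts.foldl
      (fun acc pt =>
        acc ++ (PySem.List.pyRange 0 t.2.2 1).map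
          (fun e => (PySem.Int.mod (pt.1 + e * t.1) den,
                     PySem.Int.mod (pt.2 + e * t.2.1) den)))
      []
    = pts.flatMap (fun pt =>
        (PySem.List.pyRange 0 t.2.2 1).map
          (fun e => (PySem.Int.mod (pt.1 + e * t.1) den,
                     PySem.Int.mod (pt.2 + e * t.2.1) den))) := by
  simpa using PySem.List.foldl_append_eq_flatMap
    (l := pts)
    (g := fun pt => (PySem.List.pyRange 0 t.2.2 1).map
      (fun e => (PySem.Int.mod (pt.1 + e * t.1) den,
                 PySem.Int.mod (pt.2 + e * t.2.1) den)))
    (acc := [])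

-- A's fold starting from the empty point list stays empty.
theorem foldA_nil (den : Int) (gs : List (Int × Int × Int)) :
    gs.foldl
      (fun pts t =>
        pts.foldl
          (fun acc pt =>
            acc ++ (PySem.List.pyRange 0 t.2.2 1).map
              (fun e => (PySem.Int.mod (pt.1 + e * t.1) den,
                         PySem.Int.mod (pt.2 + e * t.2.1) den)))
          [])
      ([] : List (Int × Int)) = [] := by
  induction gs with
  | nil => rfl
  | cons t rest ih => simpa using ih

theorem pvFlatMapSingleton {α β : Type} (l : List α) (f : α → β) :
    l.flatMap (fun x => [f x]) = l.map f := by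
  induction l with
  | nil => rfl
  | cons x t ih => simp [ih]

-- Main invariant: A's fold from any reduced point list equals shifting B's recursion by each point.
theorem foldA_eq_recB (den : Int) (hd : 0 < den) (gs : List (Int × Int × Int)) :
    ∀ pts : List (Int × Int),
      (∀ p ∈ pts, PySem.Int.mod p.1 den = p.1 ∧ PySem.Int.mod p.2 den = p.2) →
      gs.foldl
        (fun pts t =>
          pts.foldl
            (fun acc pt =>
              acc ++ (PySem.List.pyRange 0 t.2.2 1).map
                (fun e => (PySem.Int.mod (pt.1 + e * t.1) den,
                           PySem.Int.mod (pt.2 + e * t.2.1) den)))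
            [])
        pts
      = pts.flatMap (fun pt =>
          (gensRecB den gs).map
            (fun q => (PySem.Int.mod (pt.1 + q.1) den,
                       PySem.Int.mod (pt.2 + q.2) den))) := by
  induction gs with
  | nil =>
    intro pts hpts
    simp only [List.foldl_nil, gensRecB, List.map_cons, List.map_nil]
    rw [pvFlatMapSingleton, List.map_congr_left (fun p hp => by
      obtain ⟨h1, h2⟩ := hpts p hp
      show ((PySem.Int.mod (p.1 + 0) den, PySem.Int.mod (p.2 + 0) den) : Int × Int) = id p
      simp [h1, h2])]
    simp
  | cons t rest ih =>
    intro pts hpts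
    rw [List.foldl_cons, stepA_eq_flatMap, ih _ (by
      intro p hp
      simp only [List.mem_flatMap, List.mem_map] at hp
      obtain ⟨pt, _, e, _, rfl⟩ := hp
      exact ⟨pvModMod _ den hd, pvModMod _ den hd⟩)]
    simp only [gensRecB, List.flatMap_assoc, List.flatMap_map, List.map_flatMap, List.map_map]
    congr 1
    funext pt
    congr 1
    funext e
    congr 1
    funext q
    simp only [Function.comp, Prod.mk.injEq]
    rw [pvModAddLeft _ _ _ hd, pvModAddLeft _ _ _ hd, pvModAddRight _ _ _ hd,
        pvModAddRight _ _ _ hd]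
    constructor <;> (congr 1; ring)

-- ===== VERDICT (by name: the statement is the Claim_ definition above) =====
theorem gens_to_list_spec : Claim_equal_gens_to_list := by
  intro gens _ hpre
  show gens_to_list gens = gens_to_list_alt gens
  simp only [gens_to_list, gens_to_list_alt]
  cases hm : PySem.List.max? (gens.map (fun t => t.2.2)) (fun x => x) with
  | none =>
    exact absurd (by simpa using (PySem.List.max?_eq_none_iff _ _).mp hm) hpre
  | some m =>
    simp only [Option.getD_some]
    rcases lt_or_ge 0 m with hd | hd
    · rw [foldA_eq_recB m hd gens [(0, 0)] (by
        intro p hp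
        simp only [List.mem_singleton] at hp
        subst hp
        constructor <;> simp [PySem.Int.mod_eq_emod_of_pos hd])]
      simp only [List.flatMap_singleton]
      rw [List.map_congr_left (fun q hq => by
        obtain ⟨h1, h2⟩ := gensRecB_reduced m hd gens q hq
        show ((PySem.Int.mod (0 + q.1) m, PySem.Int.mod (0 + q.2) m) : Int × Int) = id q
        simp [h1, h2])]
      simp
    · cases gens with
      | nil => exact absurd rfl hpre
      | cons t rest =>
        have hle : t.2.2 ≤ m := by
          have := PySem.List.max?_isMax hm t.2.2 (by simp)
          simpa using this
        have hr : PySem.List.pyRange 0 t.2.2 1 = [] :=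
          PySem.List.pyRange_one_eq_nil (by omega)
        rw [List.foldl_cons]
        simp only [hr, List.map_nil, List.append_nil, List.foldl_cons, List.foldl_nil]
        rw [foldA_nil]
        simp [gensRecB, hr]
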